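-- pv_equiv track=rewrite | github.com/pducolin/advent-of-code-2020 | src/day_05/part_2.py | parse_column
-- ===== SOURCE A (Python) =====
-- COLUMNS = 8
--
-- def parse_column(raw_seat):
--     raw_column = raw_seat[-3:]
--     column_index = 0
--     for i in range(len(raw_column)):
--         if raw_column[i] == 'L':
--             continue
--         column_index += COLUMNS // (2 ** (i + 1))
--     return column_index
-- ===== SOURCE B (Python) =====
-- def parse_column(raw_seat):
--     column_index = 0
--     for char in raw_seat[-3:]:
--         column_index = 2 * column_index + (char != 'L')
--     return column_index
-- ===== Notes on version B (the rewrite author's own statement) =====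
-- stated objective: simpler
-- what changed: Replaces the index loop that sums fixed positional weights 8 // 2**(i+1) with a direct MSB-first binary (Horner) accumulation over the characters of the last-three slice.
-- intended difference: On strings shorter than 3 characters that contain a set-column (non-L) letter, A anchors the weights 4,2,1 at the front of the truncated slice (e.g. returns 4 for the one-letter code R), while B reads the code as a binary number (returns 1 there), which is the intended column value of a truncated binary seat code. — e.g. on parse_column("R"): A returns 4, B returns 1
import Mathlib
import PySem

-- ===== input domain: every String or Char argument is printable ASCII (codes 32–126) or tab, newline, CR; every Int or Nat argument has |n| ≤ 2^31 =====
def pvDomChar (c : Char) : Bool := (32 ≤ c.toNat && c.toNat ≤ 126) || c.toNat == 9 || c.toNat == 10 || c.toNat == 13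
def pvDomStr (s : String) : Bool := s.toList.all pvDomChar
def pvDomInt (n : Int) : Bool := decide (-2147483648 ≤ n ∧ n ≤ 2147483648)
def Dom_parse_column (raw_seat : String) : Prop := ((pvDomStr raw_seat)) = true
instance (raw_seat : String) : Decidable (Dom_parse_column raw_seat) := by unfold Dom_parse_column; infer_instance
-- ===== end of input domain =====

-- B reads the last-three slice as one MSB-first binary number (Horner) instead of summing
-- fixed positional weights; simpler, same cost.

-- ===== PORT A =====
def parse_column (raw_seat : String) : Int :=
  let raw_column := PySem.List.slice raw_seat.toList (some (-3)) none
  (PySem.List.pyRange 0 raw_column.length 1).foldl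
    (fun column_index i =>
      match PySem.List.pyGet? raw_column i with
      | some c => if c = 'L' then column_index
                  else column_index + PySem.Int.floordiv 8 (2 ^ (i + 1).toNat)
      | none => column_index)  -- unreachable: i ranges over valid indices
    0

-- ===== PORT B =====
def parse_column_alt (raw_seat : String) : Int :=
  (PySem.List.slice raw_seat.toList (some (-3)) none).foldl
    (fun column_index char => 2 * column_index + (if char ≠ 'L' then 1 else 0))
    0

-- ===== PRECONDITION & SPEC =====
-- On strings shorter than 3 characters containing a set-column (non-L) letter, A anchors the
-- weights 4,2,1 at the front of the truncated slice (returns 4 for the one-letter code R), while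
-- B reads it as a binary number (returns 1 there), the intended value for a truncated seat code.
def D_parse_column (raw_seat : String) : Prop :=
  raw_seat.toList.length < 3 ∧ (raw_seat.toList.any (fun c => c ≠ 'L')) = true
instance (raw_seat : String) : Decidable (D_parse_column raw_seat) := by
  unfold D_parse_column; infer_instance

def Spec_parse_column (raw_seat : String) (out : Int) : Prop :=
  ¬ D_parse_column raw_seat → out = parse_column_alt raw_seat
instance (raw_seat : String) (out : Int) : Decidable (Spec_parse_column raw_seat out) := by
  unfold Spec_parse_column; infer_instance

def pvDiffWitness_parse_column : String := "R"
def pvDiffWitnessOut_parse_column : Int × Int := (4, 1)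

-- ===== CLAIM (what is proved, stated in full; the proofs are below) =====
def Claim_unchanged_parse_column : Prop := ∀ (raw_seat : String), Dom_parse_column raw_seat → Spec_parse_column raw_seat (parse_column raw_seat)
def Claim_changed_parse_column : Prop := Dom_parse_column (pvDiffWitness_parse_column) ∧ D_parse_column (pvDiffWitness_parse_column) ∧ parse_column (pvDiffWitness_parse_column) = pvDiffWitnessOut_parse_column.1 ∧ parse_column_alt (pvDiffWitness_parse_column) = pvDiffWitnessOut_parse_column.2 ∧ pvDiffWitnessOut_parse_column.1 ≠ pvDiffWitnessOut_parse_column.2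
def Claim_exact_parse_column : Prop := ∀ (raw_seat : String), Dom_parse_column raw_seat → D_parse_column raw_seat → parse_column raw_seat ≠ parse_column_alt raw_seat


-- ===== LEMMAS AND PROOFS =====

-- Both programs evaluated on a slice of exactly three characters agree.
theorem pv_core3 (a b c : Char) :
    (PySem.List.pyRange 0 (([a, b, c] : List Char).length : Int) 1).foldl
      (fun column_index i =>
        match PySem.List.pyGet? [a, b, c] i with
        | some ch => if ch = 'L' then column_index
                     else column_index + PySem.Int.floordiv 8 (2 ^ (i + 1).toNat)
        | none => column_index) 0
    = ([a, b, c] : List Char).foldl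
        (fun column_index char => 2 * column_index + (if char ≠ 'L' then 1 else 0)) 0 := by
  have hr : PySem.List.pyRange ((0:Nat) : Int) ((3 : Nat) : Int) 1 = [0, 1, 2] := by decide
  have h0 : PySem.List.pyGet? [a, b, c] 0 = some a := by
    simp [PySem.List.pyGet?, PySem.List.pyIdx?]
  have h1 : PySem.List.pyGet? [a, b, c] 1 = some b := by
    simp [PySem.List.pyGet?, PySem.List.pyIdx?]
  have h2 : PySem.List.pyGet? [a, b, c] 2 = some c := by
    simp [PySem.List.pyGet?, PySem.List.pyIdx?]
  have f1 : PySem.Int.floordiv 8 (2 ^ (((0:Int) + 1)).toNat) = 4 := by decide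
  have f2 : PySem.Int.floordiv 8 (2 ^ (((1:Int) + 1)).toNat) = 2 := by decide
  have f3 : PySem.Int.floordiv 8 (2 ^ (((2:Int) + 1)).toNat) = 1 := by decide
  simp only [List.length_cons, List.length_nil, Nat.zero_add, hr, List.foldl, h0, h1, h2,
    f1, f2, f3]
  split_ifs <;> simp_all

-- The slice s[-3:] as a drop.
theorem pv_slice_drop (s : String) :
    PySem.List.slice s.toList (some (-3)) none = s.toList.drop (s.toList.length - 3) :=
  PySem.List.slice_from_neg_ofNat s.toList 3 (by omega)

theorem parse_column_spec : Claim_unchanged_parse_column := by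
  intro s _ hnD
  show parse_column s = parse_column_alt s
  unfold parse_column parse_column_alt
  rw [pv_slice_drop]
  by_cases hlen : 3 ≤ s.toList.length
  · have h3 : (s.toList.drop (s.toList.length - 3)).length = 3 := by
      rw [List.length_drop]; omega
    obtain ⟨xs, hxs⟩ : ∃ xs, s.toList.drop (s.toList.length - 3) = xs := ⟨_, rfl⟩
    rw [hxs] at h3 ⊢
    rcases xs with _ | ⟨a, _ | ⟨b, _ | ⟨c, _ | ⟨d, rest⟩⟩⟩⟩ <;> simp at h3
    exact pv_core3 a b c
  · have hzero : s.toList.length - 3 = 0 := by omega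
    rw [hzero, List.drop_zero]
    have hall : ∀ ch ∈ s.toList, ch = 'L' := by
      intro ch hc
      by_contra h
      have hD : D_parse_column s := by
        unfold D_parse_column
        exact ⟨by omega, List.any_eq_true.mpr ⟨ch, hc, by simp [h]⟩⟩
      exact hnD hD
    obtain ⟨t, ht⟩ : ∃ t, s.toList = t := ⟨_, rfl⟩
    rw [ht] at hall hlen ⊢
    rcases t with _ | ⟨a, _ | ⟨b, _ | ⟨c, rest⟩⟩⟩
    · decide
    · have ha := hall a (by simp)
      subst ha; decide
    · have ha := hall a (by simp)
      have hb := hall b (by simp)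
      subst ha; subst hb; decide
    · simp at hlen

theorem parse_column_tight : Claim_exact_parse_column := by
  intro s _ hD
  have hD' : s.toList.length < 3 ∧ (s.toList.any fun c => decide (c ≠ 'L')) = true := hD
  obtain ⟨hlen, hany⟩ := hD'
  unfold parse_column parse_column_alt
  rw [pv_slice_drop]
  have hzero : s.toList.length - 3 = 0 := by omega
  rw [hzero, List.drop_zero]
  obtain ⟨x, hx, hxL⟩ := List.any_eq_true.mp hany
  have hxL : x ≠ 'L' := by simpa using hxL
  obtain ⟨t, ht⟩ : ∃ t, s.toList = t := ⟨_, rfl⟩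
  rw [ht] at hx hlen ⊢
  rcases t with _ | ⟨a, _ | ⟨b, rest⟩⟩
  · simp at hx
  · simp at hx
    subst hx
    simp only [List.length_cons, List.length_nil, Nat.cast_one, Nat.zero_add]
    rw [show PySem.List.pyRange (0 : Int) (1 : Int) = [0] from by decide]
    simp only [List.foldl]
    simp [PySem.List.pyGet?, PySem.List.pyIdx?, PySem.Int.floordiv, hxL]
  · have hrest : rest = [] := by
      simp at hlen
      exact List.length_eq_zero_iff.mp (by omega)
    subst hrest
    have hab : a ≠ 'L' ∨ b ≠ 'L' := by
      simp at hx
      rcases hx with h | h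
      · exact Or.inl (h ▸ hxL)
      · exact Or.inr (h ▸ hxL)
    norm_num
    rw [show PySem.List.pyRange (0 : Int) (2 : Int) = [0, 1] from by decide]
    simp only [List.foldl]
    simp only [PySem.List.pyGet?, PySem.List.pyIdx?]
    rcases hab with h | h <;> split_ifs <;> simp_all [PySem.Int.floordiv] <;> omega

-- ===== VERDICT (by name: the statement is the Claim_ definition above) =====
theorem parse_column_changed : Claim_changed_parse_column := by
  unfold Claim_changed_parse_column; decide
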